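-- pv_equiv track=rewrite | github.com/asokolowskii/Introduction-to-Computer-Science | Zestaw 2 - Tablice jednowymiarowe/Zadanie 75/75.py | czy_max_min
-- ===== SOURCE A (Python) =====
-- def czy_max_min(T):
--     n=len(T)
--     min_el=max_el=T[0]
--     min_cnt=max_cnt=1
--
--     for el in range(1,n):
--         if T[el]<min_el:
--             min_el = T[el]
--             min_cnt=1
--         elif T[el]==min_el:
--             min_cnt+=1
--         #end if
--
--         if T[el]>max_el:
--             max_el=T[el]
--             max_cnt=1
--         elif T[el]==max_el:
--             max_cnt+=1
--         #end if
--     #end for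
--     return min_cnt==1 and max_cnt==1, T
-- ===== SOURCE B (Python) =====
-- def czy_max_min(T):
--     lo = min(T)
--     hi = max(T)
--     return T.count(lo) == 1 and T.count(hi) == 1, T
-- ===== Notes on version B (the rewrite author's own statement) =====
-- stated objective: idiomatic
-- what changed: Replaces A's single fused index loop maintaining running min/max with their counts by built-in min/max plus separate count scans.
-- outside the precondition, e.g. on czy_max_min([]): A raises IndexError, B raises ValueError
import Mathlib
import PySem

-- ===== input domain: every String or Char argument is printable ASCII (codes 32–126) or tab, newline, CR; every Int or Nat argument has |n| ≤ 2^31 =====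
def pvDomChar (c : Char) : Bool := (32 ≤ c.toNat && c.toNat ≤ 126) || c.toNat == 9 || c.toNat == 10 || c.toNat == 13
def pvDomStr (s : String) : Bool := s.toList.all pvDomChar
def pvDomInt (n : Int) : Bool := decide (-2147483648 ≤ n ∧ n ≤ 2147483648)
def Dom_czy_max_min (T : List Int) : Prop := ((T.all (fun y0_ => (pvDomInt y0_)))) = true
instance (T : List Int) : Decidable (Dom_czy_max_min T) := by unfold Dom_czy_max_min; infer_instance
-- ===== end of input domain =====

-- B computes min/max with the built-ins and counts their occurrences, instead of A's fused
-- running-extrema loop (idiomatic rewrite; Pre_ excludes the empty list, on which A raises IndexError).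


-- ===== PORT A =====
-- the loop body of A, one step per index's element value
def czyStep (s : Int × Int × Int × Int) (x : Int) : Int × Int × Int × Int :=
  let (min_el, min_cnt, max_el, max_cnt) := s
  let (min_el, min_cnt) :=
    if x < min_el then (x, 1)
    else if x = min_el then (min_el, min_cnt + 1)
    else (min_el, min_cnt)
  let (max_el, max_cnt) :=
    if x > max_el then (x, 1)
    else if x = max_el then (max_el, max_cnt + 1)
    else (max_el, max_cnt)
  (min_el, min_cnt, max_el, max_cnt)

def czy_max_min (T : List Int) : Bool × List Int :=
  let n : Int := T.length
  let first := PySem.List.pyGetD T 0 0   -- T[0]; exact under Pre_ (T ≠ [])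
  let st := (PySem.List.pyRange 1 n 1).foldl
      (fun s el => czyStep s (PySem.List.pyGetD T el 0)) (first, 1, first, 1)
  (decide (st.2.1 = 1 ∧ st.2.2.2 = 1), T)

-- ===== PORT B =====
def czy_max_min_alt (T : List Int) : Bool × List Int :=
  let lo := (PySem.List.min? T (fun y => y)).getD 0   -- min(T); exact under Pre_ (T ≠ [])
  let hi := (PySem.List.max? T (fun y => y)).getD 0
  (decide (PySem.List.count T lo = 1 ∧ PySem.List.count T hi = 1), T)

-- ===== PRECONDITION & SPEC =====
-- Pre_ excludes only the empty list, on which A raises IndexError (T[0]) and B raises ValueError (min([])).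
def Pre_czy_max_min (T : List Int) : Prop := T ≠ []
instance (T : List Int) : Decidable (Pre_czy_max_min T) := by unfold Pre_czy_max_min; infer_instance
def pvWitness_czy_max_min : List Int := [3, 1, 2]

def Spec_czy_max_min (T : List Int) (out : Bool × List Int) : Prop := out = czy_max_min_alt T
instance (T : List Int) (out : Bool × List Int) : Decidable (Spec_czy_max_min T out) := by unfold Spec_czy_max_min; infer_instance

-- ===== CLAIM (what is proved, stated in full; the proofs are below) =====
def Claim_equal_czy_max_min : Prop := ∀ (T : List Int), Dom_czy_max_min T → Pre_czy_max_min T → Spec_czy_max_min T (czy_max_min T)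

-- ===== LEMMAS AND PROOFS =====

-- the min- and max-halves of A's loop body, acting on their own pair of state components
def minStep (p : Int × Int) (x : Int) : Int × Int :=
  if x < p.1 then (x, 1) else if x = p.1 then (p.1, p.2 + 1) else p

def maxStep (p : Int × Int) (x : Int) : Int × Int :=
  if x > p.1 then (x, 1) else if x = p.1 then (p.1, p.2 + 1) else p

-- czyStep acts componentwise: the 4-tuple fold splits into two pair folds
lemma czyStep_split (l : List Int) : ∀ (m c M C : Int),
    l.foldl czyStep (m, c, M, C) =
      ((l.foldl minStep (m, c)).1, (l.foldl minStep (m, c)).2,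
       (l.foldl maxStep (M, C)).1, (l.foldl maxStep (M, C)).2) := by
  induction l with
  | nil => intro m c M C; simp
  | cons x t ih =>
    intro m c M C
    simp only [List.foldl_cons, czyStep, minStep, maxStep]
    split_ifs <;> simp_all

-- running minimum with count = minimum of the prefix and its multiplicity
lemma minStep_foldl (l : List Int) : ∀ (m c : Int),
    l.foldl minStep (m, c) =
      (l.foldl min m,
       (if l.foldl min m < m then 0 else c) + (l.count (l.foldl min m) : Int)) := by
  induction l with
  | nil => intro m c; simp
  | cons x t ih =>
    intro m c
    have hle : ∀ a : Int, t.foldl min a ≤ a := fun a => (PySem.List.foldl_min_le t a).1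
    simp only [List.foldl_cons, minStep]
    rcases lt_trichotomy x m with h | h | h
    · rw [if_pos h, ih]
      have h1 : min m x = x := by omega
      have h2 : t.foldl min x < m := lt_of_le_of_lt (hle x) h
      simp only [h1, if_pos h2]
      by_cases h3 : t.foldl min x < x
      · simp [List.count_cons, h3]
        omega
      · have : t.foldl min x = x := le_antisymm (hle x) (by omega)
        simp [this]
        omega
    · subst h
      rw [if_neg (lt_irrefl x), if_pos rfl, ih]
      simp only [min_self]
      by_cases h3 : t.foldl min x < x
      · simp [List.count_cons, h3]
        omega
      · have : t.foldl min x = x := le_antisymm (hle x) (by omega)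
        simp [this]
        omega
    · rw [if_neg (by omega), if_neg (by omega), ih]
      have h1 : min m x = m := by omega
      simp only [h1]
      have h2 : t.foldl min m ≤ m := hle m
      have hne : t.foldl min m ≠ x := by omega
      simp [Ne.symm hne]

-- running maximum with count = maximum of the prefix and its multiplicity
lemma maxStep_foldl (l : List Int) : ∀ (M C : Int),
    l.foldl maxStep (M, C) =
      (l.foldl max M,
       (if M < l.foldl max M then 0 else C) + (l.count (l.foldl max M) : Int)) := by
  induction l with
  | nil => intro M C; simp
  | cons x t ih =>
    intro M C
    have hle : ∀ a : Int, a ≤ t.foldl max a := fun a => (PySem.List.le_foldl_max t a).1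
    simp only [List.foldl_cons, maxStep]
    rcases lt_trichotomy M x with h | h | h
    · rw [if_pos h, ih]
      have h1 : max M x = x := by omega
      have h2 : M < t.foldl max x := lt_of_lt_of_le h (hle x)
      simp only [h1, if_pos h2]
      by_cases h3 : x < t.foldl max x
      · simp [List.count_cons, h3]
        omega
      · have : t.foldl max x = x := le_antisymm (by omega) (hle x)
        simp [this]
        omega
    · subst h
      rw [if_neg (lt_irrefl M), if_pos rfl, ih]
      simp only [max_self]
      by_cases h3 : M < t.foldl max M
      · have hne : t.foldl max M ≠ M := by omega
        simp [Ne.symm hne, h3]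
      · have : t.foldl max M = M := le_antisymm (by omega) (hle M)
        simp [this]
        omega
    · rw [if_neg (by omega), if_neg (by omega), ih]
      have h1 : max M x = M := by omega
      simp only [h1]
      have h2 : M ≤ t.foldl max M := hle M
      have hne : t.foldl max M ≠ x := by omega
      simp [Ne.symm hne]

-- ===== VERDICT (by name: the statement is the Claim_ definition above) =====
theorem czy_max_min_spec : Claim_equal_czy_max_min := by
  intro T _ hpre
  obtain ⟨h, t, rfl⟩ : ∃ h t, T = h :: t := by
    cases T with
    | nil => exact absurd rfl hpre
    | cons h t => exact ⟨h, t, rfl⟩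
  unfold Spec_czy_max_min czy_max_min czy_max_min_alt
  simp only [PySem.List.min?_id_cons, PySem.List.max?_id_cons, Option.getD_some]
  have hfold : (PySem.List.pyRange 1 ((h :: t).length : Int) 1).foldl
      (fun s el => czyStep s (PySem.List.pyGetD (h :: t) el 0)) (h, 1, h, 1)
      = t.foldl czyStep (h, 1, h, 1) := by
    have := PySem.List.foldl_pyRange_pyGetD (xs := h :: t) (a := 1) (d := 0)
      (f := czyStep) (init := (h, 1, h, 1)) (by norm_num)
    simpa using this
  have hget0 : PySem.List.pyGetD (h :: t) 0 0 = h := by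
    simp [PySem.List.pyGetD, PySem.List.pyGet?, PySem.List.pyIdx?]
  simp only [hget0, hfold, czyStep_split, minStep_foldl, maxStep_foldl]
  have hmin : t.foldl min h ≤ h := (PySem.List.foldl_min_le t h).1
  have hmax : h ≤ t.foldl max h := (PySem.List.le_foldl_max t h).1
  have hcmin : ((h :: t).count (t.foldl min h) : Int)
      = (if t.foldl min h < h then 0 else 1) + (t.count (t.foldl min h) : Int) := by
    by_cases h2 : t.foldl min h < h
    · have hne : t.foldl min h ≠ h := by omega
      simp [h2, Ne.symm hne]
    · simp [(by omega : t.foldl min h = h)]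
      omega
  have hcmax : ((h :: t).count (t.foldl max h) : Int)
      = (if h < t.foldl max h then 0 else 1) + (t.count (t.foldl max h) : Int) := by
    by_cases h2 : h < t.foldl max h
    · have hne : t.foldl max h ≠ h := by omega
      simp [h2, Ne.symm hne]
    · simp [(by omega : t.foldl max h = h)]
      omega
  refine Prod.ext ?_ rfl
  simp only [PySem.List.count]
  rw [decide_eq_decide]
  constructor
  · rintro ⟨h1, h2⟩
    constructor
    · have := hcmin; omega
    · have := hcmax; omega
  · rintro ⟨h1, h2⟩
    have hc1 : ((h :: t).count (t.foldl min h) : Int) = 1 := by exact_mod_cast h1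
    have hc2 : ((h :: t).count (t.foldl max h) : Int) = 1 := by exact_mod_cast h2
    constructor
    · rw [hcmin] at hc1; omega
    · rw [hcmax] at hc2; omega
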